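-- pv_equiv track=rewrite | github.com/RCarnicelli/api-matriz-beneficios | app.py | infer_usage_and_relevance
-- ===== SOURCE A (Python) =====
-- def infer_usage_and_relevance(differential: str):
--     """
--     Heurística simples:
--     - Se tiver 'novo', 'lançar', 'implementar' -> nao_tem
--     - Se tiver 'temos', 'já', 'ja', 'sempre' -> temos_muito
--     - Caso contrário -> temos_pouco
--     Relevância:
--     - se reconhecido como 'autorais', 'manifesto', 'selo' -> pode_gerar_muito_valor
--     - se 'entrega', 'pagamento' -> gera_valor
--     - senão -> um_pouco_comum
--     """
--     txt = (differential or "").lower()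
--     if any(w in txt for w in ["novo", "lançar", "lancar", "implementar", "criar"]):
--         usage = "nao_tem"
--     elif any(w in txt for w in ["temos", "já", "ja", "sempre", "oferecemos"]):
--         usage = "temos_muito"
--     else:
--         usage = "temos_pouco"
--
--     if any(w in txt for w in ["autorais", "manifesto", "selo", "prêmio", "premio", "imprensa", "ugc", "hashtag"]):
--         rel = "pode_gerar_muito_valor"
--     elif any(w in txt for w in ["entrega", "pagamento", "pedido", "app", "whatsapp"]):
--         rel = "gera_valor"
--     else:
--         rel = "um_pouco_comum"
--
--     # recomendação básica
--     rec = "manter"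
--     if usage == "nao_tem":
--         rec = "desenvolver" if rel in ["gera_valor", "pode_gerar_muito_valor"] else "ignorar"
--     elif usage == "temos_pouco":
--         rec = "aprimorar" if rel != "muito_comum" else "dar_clareza"
--     elif usage == "temos_muito":
--         rec = "proteger" if rel == "pode_gerar_muito_valor" else ("manter" if rel == "gera_valor" else "reduzir")
--
--     priority = "alta" if rec in ["proteger", "desenvolver"] else ("media" if rec in ["aprimorar", "manter"] else "baixa")
--
--     # normalizar enum
--     if rec == "ignorar": rec = "reduzir"
--     if rec == "dar_clareza": rec = "manter"
--
--     return usage, rel, rec, priority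
-- ===== SOURCE B (Python) =====
-- # B: single-pass max-level scoring over one flat ranked keyword list (accumulator fold),
-- # then arithmetic index (3*u + r) into flat name/decision tables; no if/elif cascades.
--
-- _USAGE_RANKED = [(w, 2) for w in ["novo", "lançar", "lancar", "implementar", "criar"]] \
--               + [(w, 1) for w in ["temos", "já", "ja", "sempre", "oferecemos"]]
-- _REL_RANKED = [(w, 2) for w in ["autorais", "manifesto", "selo", "prêmio", "premio", "imprensa", "ugc", "hashtag"]] \
--             + [(w, 1) for w in ["entrega", "pagamento", "pedido", "app", "whatsapp"]]
--
-- _USAGE_NAMES = ["temos_pouco", "temos_muito", "nao_tem"]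
-- _REL_NAMES = ["um_pouco_comum", "gera_valor", "pode_gerar_muito_valor"]
--
-- # indexed by 3*u + r
-- _OUT = [
--     ("aprimorar", "media"), ("aprimorar", "media"), ("aprimorar", "media"),   # u=0 temos_pouco
--     ("reduzir", "baixa"), ("manter", "media"), ("proteger", "alta"),          # u=1 temos_muito
--     ("reduzir", "baixa"), ("desenvolver", "alta"), ("desenvolver", "alta"),   # u=2 nao_tem
-- ]
--
-- def _score(txt, ranked):
--     s = 0
--     for w, lvl in ranked:
--         if lvl > s and w in txt:
--             s = lvl
--     return s
--
-- def infer_usage_and_relevance(differential: str):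
--     txt = (differential or "").lower()
--     u = _score(txt, _USAGE_RANKED)
--     r = _score(txt, _REL_RANKED)
--     rec, priority = _OUT[3 * u + r]
--     return _USAGE_NAMES[u], _REL_NAMES[r], rec, priority
-- ===== Notes on version B (the rewrite author's own statement) =====
-- stated objective: alternative
-- what changed: Replaces the staged if/elif keyword-group scans, the rec/priority branching cascade and the post-hoc enum normalization with a single-pass max-level scoring fold over flat ranked keyword lists (accumulator loop) plus arithmetic indexing (3*u + r) into flat name/decision tables.
import Mathlib
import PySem

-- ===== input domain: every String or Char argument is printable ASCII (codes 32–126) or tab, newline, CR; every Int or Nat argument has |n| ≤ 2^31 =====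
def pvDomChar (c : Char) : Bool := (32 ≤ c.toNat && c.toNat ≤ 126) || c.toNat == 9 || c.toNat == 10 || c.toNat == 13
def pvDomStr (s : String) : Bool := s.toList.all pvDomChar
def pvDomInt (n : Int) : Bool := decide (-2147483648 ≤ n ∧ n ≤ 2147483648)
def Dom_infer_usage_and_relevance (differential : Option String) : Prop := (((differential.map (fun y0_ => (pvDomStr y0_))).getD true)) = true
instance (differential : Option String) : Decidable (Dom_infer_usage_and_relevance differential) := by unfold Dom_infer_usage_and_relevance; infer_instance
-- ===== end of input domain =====

-- B replaces A's staged if/elif keyword scans, rec/priority cascade and post-hoc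
-- normalization by a single-pass max-level scoring fold over flat ranked keyword
-- lists plus an arithmetic index (3*u + r) into flat tables (objective: simpler).

-- ===== PORT A =====
def infer_usage_and_relevance (differential : Option String) : String × String × String × String :=
  let txt := PySem.Str.lower (differential.getD "")
  let usage :=
    if ["novo", "lançar", "lancar", "implementar", "criar"].any (fun w => PySem.Str.isIn w txt) then "nao_tem"
    else if ["temos", "já", "ja", "sempre", "oferecemos"].any (fun w => PySem.Str.isIn w txt) then "temos_muito"
    else "temos_pouco"
  let rel :=
    if ["autorais", "manifesto", "selo", "prêmio", "premio", "imprensa", "ugc", "hashtag"].any (fun w => PySem.Str.isIn w txt) then "pode_gerar_muito_valor"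
    else if ["entrega", "pagamento", "pedido", "app", "whatsapp"].any (fun w => PySem.Str.isIn w txt) then "gera_valor"
    else "um_pouco_comum"
  -- rec = "manter"; the if/elif chain then reassigns it
  let rec0 := "manter"
  let rec1 :=
    if usage = "nao_tem" then
      (if rel ∈ ["gera_valor", "pode_gerar_muito_valor"] then "desenvolver" else "ignorar")
    else if usage = "temos_pouco" then
      (if rel ≠ "muito_comum" then "aprimorar" else "dar_clareza")
    else if usage = "temos_muito" then
      (if rel = "pode_gerar_muito_valor" then "proteger"
       else if rel = "gera_valor" then "manter" else "reduzir")
    else rec0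
  let priority :=
    if rec1 ∈ ["proteger", "desenvolver"] then "alta"
    else if rec1 ∈ ["aprimorar", "manter"] then "media" else "baixa"
  -- normalizar enum
  let rec2 := if rec1 = "ignorar" then "reduzir" else rec1
  let rec3 := if rec2 = "dar_clareza" then "manter" else rec2
  (usage, rel, rec3, priority)

-- ===== PORT B =====
def pvUsageRanked : List (String × Nat) :=
  (["novo", "lançar", "lancar", "implementar", "criar"].map (fun w => (w, 2)))
  ++ (["temos", "já", "ja", "sempre", "oferecemos"].map (fun w => (w, 1)))

def pvRelRanked : List (String × Nat) :=
  (["autorais", "manifesto", "selo", "prêmio", "premio", "imprensa", "ugc", "hashtag"].map (fun w => (w, 2)))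
  ++ (["entrega", "pagamento", "pedido", "app", "whatsapp"].map (fun w => (w, 1)))

def pvUsageNames : List String := ["temos_pouco", "temos_muito", "nao_tem"]
def pvRelNames : List String := ["um_pouco_comum", "gera_valor", "pode_gerar_muito_valor"]

-- indexed by 3*u + r
def pvOut : List (String × String) :=
  [("aprimorar", "media"), ("aprimorar", "media"), ("aprimorar", "media"),
   ("reduzir", "baixa"), ("manter", "media"), ("proteger", "alta"),
   ("reduzir", "baixa"), ("desenvolver", "alta"), ("desenvolver", "alta")]

-- the accumulator loop of _score, transliterated as tail recursion
def pvScoreGo (txt : String) (s : Nat) : List (String × Nat) → Nat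
  | [] => s
  | (w, lvl) :: rest => pvScoreGo txt (if lvl > s ∧ PySem.Str.isIn w txt then lvl else s) rest

def pvScore (txt : String) (ranked : List (String × Nat)) : Nat := pvScoreGo txt 0 ranked

def infer_usage_and_relevance_alt (differential : Option String) : String × String × String × String :=
  let txt := PySem.Str.lower (differential.getD "")
  let u := pvScore txt pvUsageRanked
  let r := pvScore txt pvRelRanked
  -- list indexing: u, r are always 0..2 so 3*u+r is in range; getD's default is unreachable
  let rp := pvOut.getD (3 * u + r) ("", "")
  (pvUsageNames.getD u "", pvRelNames.getD r "", rp.1, rp.2)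

-- ===== PRECONDITION & SPEC =====
def Spec_infer_usage_and_relevance (differential : Option String) (out : String × String × String × String) : Prop := out = infer_usage_and_relevance_alt differential
instance (differential : Option String) (out : String × String × String × String) : Decidable (Spec_infer_usage_and_relevance differential out) := by unfold Spec_infer_usage_and_relevance; infer_instance

-- ===== CLAIM (what is proved, stated in full; the proofs are below) =====
def Claim_equal_infer_usage_and_relevance : Prop := ∀ (differential : Option String), Dom_infer_usage_and_relevance differential → Spec_infer_usage_and_relevance differential (infer_usage_and_relevance differential)

-- ===== LEMMAS AND PROOFS =====

-- the score loop never lowers the accumulator past the levels already reached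
theorem pvScoreGo_stuck (txt : String) (s : Nat) (ws : List (String × Nat))
    (h : ∀ wl ∈ ws, wl.2 ≤ s) : pvScoreGo txt s ws = s := by
  induction ws with
  | nil => rfl
  | cons wl rest ih =>
    obtain ⟨w, lvl⟩ := wl
    have hle : lvl ≤ s := h _ (List.mem_cons_self ..)
    simp only [pvScoreGo,
      if_neg (show ¬(lvl > s ∧ PySem.Str.isIn w txt = true) from fun hc => absurd hc.1 (by omega))]
    exact ih (fun x hx => h x (List.mem_cons_of_mem _ hx))

-- on a constant-level block with s below the level, the loop computes "any match"
theorem pvScoreGo_const (txt : String) (l s : Nat) (ws : List String) (h : s < l) :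
    pvScoreGo txt s (ws.map (fun w => (w, l)))
      = if ws.any (fun w => PySem.Str.isIn w txt) then l else s := by
  induction ws generalizing s with
  | nil => simp [pvScoreGo]
  | cons w rest ih =>
    simp only [List.map, pvScoreGo, List.any_cons]
    by_cases hw : PySem.Str.isIn w txt = true
    · rw [if_pos ⟨h, hw⟩]
      simp only [hw, Bool.true_or, if_true]
      simp [pvScoreGo_stuck txt l (rest.map (fun w => (w, l)))
        (by intro wl hwl; rw [List.mem_map] at hwl; obtain ⟨x, hx, rfl⟩ := hwl; exact le_refl l)]
    · rw [if_neg (fun hc => hw hc.2)]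
      simp only [Bool.not_eq_true] at hw
      simp only [hw, Bool.false_or]
      exact ih s h

theorem pvScoreGo_append (txt : String) (s : Nat) (a b : List (String × Nat)) :
    pvScoreGo txt s (a ++ b) = pvScoreGo txt (pvScoreGo txt s a) b := by
  induction a generalizing s with
  | nil => rfl
  | cons wl rest ih => obtain ⟨w, l⟩ := wl; simp only [List.cons_append, pvScoreGo, ih]

-- a two-block ranked list (levels 2 then 1) computes the staged "first matching group"
theorem pvScore_two_blocks (txt : String) (g1 g2 : List String) :
    pvScore txt ((g1.map (fun w => (w, 2))) ++ (g2.map (fun w => (w, 1))))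
      = if g1.any (fun w => PySem.Str.isIn w txt) then 2
        else if g2.any (fun w => PySem.Str.isIn w txt) then 1 else 0 := by
  rw [pvScore, pvScoreGo_append, pvScoreGo_const txt 2 0 g1 (by omega)]
  cases h1 : g1.any (fun w => PySem.Str.isIn w txt) with
  | true =>
    simp only [if_true]
    exact pvScoreGo_stuck txt 2 _
      (by intro wl hwl; rw [List.mem_map] at hwl; obtain ⟨x, hx, rfl⟩ := hwl; omega)
  | false =>
    simp only [Bool.false_eq_true, if_false]
    rw [pvScoreGo_const txt 1 0 g2 (by omega)]

theorem infer_eq (differential : Option String) :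
    infer_usage_and_relevance differential = infer_usage_and_relevance_alt differential := by
  simp only [infer_usage_and_relevance, infer_usage_and_relevance_alt,
    pvUsageRanked, pvRelRanked, pvScore_two_blocks]
  generalize (["novo", "lançar", "lancar", "implementar", "criar"] : List String).any
      (fun w => PySem.Str.isIn w (PySem.Str.lower (differential.getD ""))) = b1
  generalize (["temos", "já", "ja", "sempre", "oferecemos"] : List String).any
      (fun w => PySem.Str.isIn w (PySem.Str.lower (differential.getD ""))) = b2
  generalize (["autorais", "manifesto", "selo", "prêmio", "premio", "imprensa", "ugc", "hashtag"] : List String).any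
      (fun w => PySem.Str.isIn w (PySem.Str.lower (differential.getD ""))) = b3
  generalize (["entrega", "pagamento", "pedido", "app", "whatsapp"] : List String).any
      (fun w => PySem.Str.isIn w (PySem.Str.lower (differential.getD ""))) = b4
  cases b1 <;> cases b2 <;> cases b3 <;> cases b4 <;> decide

-- ===== VERDICT (by name: the statement is the Claim_ definition above) =====
theorem infer_usage_and_relevance_spec : Claim_equal_infer_usage_and_relevance := by
  intro d _
  unfold Spec_infer_usage_and_relevance
  exact infer_eq d
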